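-- pv_equiv track=rewrite | github.com/MarianDanaila/Competitive-Programming | LeetCode_30days_challenge/2021/August/Longest Uncommon Subsequence II.py | findLUSlength
-- ===== SOURCE A (Python) =====
-- from itertools import combinations
-- from typing import List
--
-- def findLUSlength(strs: List[str]) -> int:
--     subsequences = {}
--
--     def all_subsequences(s):
--         for r in range(1, len(s) + 1):
--             for c in combinations(s, r):
--                 subsequence = "".join(c)
--                 if subsequence in subsequences:
--                     subsequences[subsequence] += 1
--                 else:
--                     subsequences[subsequence] = 1
--
--     for string in strs:
--         all_subsequences(string)
--
--     longest = -1
--     for subsequence in subsequences: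
--         if subsequences[subsequence] == 1:
--             longest = max(longest, len(subsequence))
--     return longest
-- ===== SOURCE B (Python) =====
-- from itertools import takewhile
-- from typing import List
--
-- def findLUSlength(strs: List[str]) -> int:
--     def is_subseq(s, t):
--         i = j = 0
--         while i < len(s) and j < len(t):
--             if s[i] == t[j]:
--                 i += 1
--             j += 1
--         return i == len(s)
--
--     cnt = {}
--     for s in strs:
--         cnt[s] = cnt.get(s, 0) + 1
--     distinct = sorted(cnt, key=len, reverse=True)
--     for s in distinct:
--         if cnt[s] == 1 and not any(
--             is_subseq(s, t) for t in takewhile(lambda t: len(t) > len(s), distinct)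
--         ):
--             return len(s)
--     return -1
-- ===== Notes on version B (the rewrite author's own statement) =====
-- stated objective: faster
-- what changed: B replaces A's enumeration of all 2^L subsequences of every string into a counting dict by: count occurrences in a dict, sort the distinct strings by length descending, and return the length of the first string that occurs once and is (by a two-pointer test) a subsequence of no strictly longer distinct string, with early exit.
-- outside the precondition, e.g. on findLUSlength(['']): A returns -1, B returns 0
import Mathlib
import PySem

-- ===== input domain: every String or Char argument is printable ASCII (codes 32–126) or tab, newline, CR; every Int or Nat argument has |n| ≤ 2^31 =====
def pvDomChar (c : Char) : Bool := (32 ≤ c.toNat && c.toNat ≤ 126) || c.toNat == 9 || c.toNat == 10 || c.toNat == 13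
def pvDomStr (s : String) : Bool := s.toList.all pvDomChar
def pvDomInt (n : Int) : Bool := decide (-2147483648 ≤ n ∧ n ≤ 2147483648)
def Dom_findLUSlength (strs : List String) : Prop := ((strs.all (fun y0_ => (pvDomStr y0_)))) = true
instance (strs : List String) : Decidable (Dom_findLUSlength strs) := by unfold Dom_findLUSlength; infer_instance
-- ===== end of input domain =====

-- B replaces A's enumeration of every subsequence of every string (collected in a counting dict)
-- by pairwise two-pointer subsequence tests; objective: faster (asymptotic).

-- ===== PORT A =====
-- Python's dict is ported as Std.HashMap (a hash map, as in CPython); the returned value only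
-- reads per-key counts, so the dict's iteration order never influences the result.
-- inner helper all_subsequences(s): both nested loops, incrementing the shared dict
def pvAddSubs (s : String) (d : Std.HashMap String Int) : Std.HashMap String Int :=
  (List.range' 1 s.toList.length).foldl (fun d r =>
    (PySem.List.combinations s.toList r).foldl (fun d c =>
      let sub := String.ofList c
      if d.contains sub then d.insert sub (d.getD sub 0 + 1) else d.insert sub 1) d) d

def findLUSlength (strs : List String) : Int :=
  let subsequences := strs.foldl (fun d s => pvAddSubs s d) (∅ : Std.HashMap String Int)
  subsequences.keys.foldl
    (fun longest u =>
      if subsequences.getD u 0 == 1 then max longest ((u.toList.length : Int)) else longest)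
    (-1)

-- ===== PORT B =====
-- is_subseq(s, t): the two-pointer while loop of Source B
def pvIsSubseq : List Char → List Char → Bool
  | [], _ => true
  | _ :: _, [] => false
  | a :: as, b :: bs => if a = b then pvIsSubseq as bs else pvIsSubseq (a :: as) bs

-- the early-exit 'for s in distinct: … return len(s)' loop of Source B
def pvScan (cnt : PySem.Dict String Int) (distinct : List String) : List String → Int
  | [] => -1
  | s :: rest =>
    if cnt.getD s 0 == 1
        && !((distinct.takeWhile (fun t => decide (s.toList.length < t.toList.length))).any
              (fun t => pvIsSubseq s.toList t.toList))
    then (s.toList.length : Int)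
    else pvScan cnt distinct rest

def findLUSlength_alt (strs : List String) : Int :=
  let cnt := strs.foldl (fun d s => d.insert s (d.getD s 0 + 1)) PySem.Dict.empty
  let distinct := PySem.List.sorted cnt.keys (fun s => s.toList.length) true
  pvScan cnt distinct distinct

-- ===== PRECONDITION & SPEC =====
-- Pre_ excludes only the single-element list [""]: whether the empty string counts as an
-- uncommon subsequence there is unspecified (A returns -1, B returns 0; both defensible).
def Pre_findLUSlength (strs : List String) : Prop := strs ≠ [""]
instance (strs : List String) : Decidable (Pre_findLUSlength strs) := by
  unfold Pre_findLUSlength; infer_instance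

def pvWitness_findLUSlength : List String := ["aba", "cdc", "ab"]

def Spec_findLUSlength (strs : List String) (out : Int) : Prop := out = findLUSlength_alt strs
instance (strs : List String) (out : Int) : Decidable (Spec_findLUSlength strs out) := by
  unfold Spec_findLUSlength; infer_instance

-- ===== CLAIM (what is proved, stated in full; the proofs are below) =====
def Claim_equal_findLUSlength : Prop := ∀ (strs : List String), Dom_findLUSlength strs → Pre_findLUSlength strs → Spec_findLUSlength strs (findLUSlength strs)

-- ===== LEMMAS AND PROOFS =====

-- the list of subsequence-strings A generates from one string s (with multiplicity)
def pvGen (s : String) : List String :=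
  (List.range' 1 s.toList.length).flatMap
    (fun r => (PySem.List.combinations s.toList r).map String.ofList)

def pvAll (strs : List String) : List String := strs.flatMap pvGen

lemma pvAddSubs_eq (s : String) (d : Std.HashMap String Int) :
    pvAddSubs s d = (pvGen s).foldl (fun d u => d.insert u (d.getD u 0 + 1)) d := by
  unfold pvAddSubs pvGen
  rw [List.foldl_flatMap]
  congr 1
  funext d r
  rw [List.foldl_map]
  congr 1
  funext d c
  by_cases h : d.contains (String.ofList c) = true
  · simp only [h, if_pos]
  · simp only [Bool.not_eq_true] at h
    simp only [h, Bool.false_eq_true, if_false,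
      Std.HashMap.getD_eq_fallback_of_contains_eq_false h, Int.zero_add]

lemma pv_build_eq (strs : List String) :
    strs.foldl (fun d s => pvAddSubs s d) (∅ : Std.HashMap String Int)
      = (pvAll strs).foldl (fun d u => d.insert u (d.getD u 0 + 1)) (∅ : Std.HashMap String Int) := by
  unfold pvAll
  rw [List.foldl_flatMap]
  congr 1
  funext d s
  exact pvAddSubs_eq s d

lemma pv_getD_foldl (l : List String) (d : Std.HashMap String Int) (u : String) :
    (l.foldl (fun d u => d.insert u (d.getD u 0 + 1)) d).getD u 0
      = d.getD u 0 + (l.count u : Int) := by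
  induction l generalizing d with
  | nil => simp
  | cons x t ih =>
    rw [List.foldl_cons, ih, Std.HashMap.getD_insert, List.count_cons]
    by_cases h : x = u
    · simp only [h, beq_self_eq_true, if_true]
      push_cast
      ring
    · have hb : (x == u) = false := beq_eq_false_iff_ne.mpr h
      have hb' : (u == x) = false := beq_eq_false_iff_ne.mpr (fun e => h e.symm)
      simp [hb]

lemma pv_mem_keys_foldl (l : List String) (d : Std.HashMap String Int) (u : String) :
    u ∈ (l.foldl (fun d u => d.insert u (d.getD u 0 + 1)) d).keys ↔ u ∈ d.keys ∨ u ∈ l := by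
  induction l generalizing d with
  | nil => simp
  | cons x t ih =>
    rw [List.foldl_cons, ih, Std.HashMap.mem_keys, Std.HashMap.mem_insert, ← Std.HashMap.mem_keys]
    simp only [beq_iff_eq, List.mem_cons]
    tauto

lemma pv_mem_gen (u s : String) :
    u ∈ pvGen s ↔ u.toList.Sublist s.toList ∧ u.toList ≠ [] := by
  unfold pvGen
  simp only [List.mem_flatMap, List.mem_map, List.mem_range'_1, PySem.List.mem_combinations_iff]
  constructor
  · rintro ⟨r, ⟨hr1, hr2⟩, c, ⟨hsub, hlen⟩, rfl⟩
    rw [String.toList_ofList]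
    refine ⟨hsub, ?_⟩
    intro h
    rw [h] at hlen
    simp at hlen
    omega
  · rintro ⟨hsub, hne⟩
    have hlen1 : 1 ≤ u.toList.length := by
      have := List.length_pos_iff.mpr hne
      omega
    refine ⟨u.toList.length, ⟨hlen1, ?_⟩, u.toList, ⟨hsub, rfl⟩, ?_⟩
    · have := hsub.length_le
      omega
    · exact String.ofList_toList

lemma pv_isSubseq_eq_isSublist (a b : List Char) : pvIsSubseq a b = List.isSublist a b := by
  induction b generalizing a with
  | nil => cases a <;> simp [pvIsSubseq, List.isSublist]
  | cons y bs ih =>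
    cases a with
    | nil => simp [pvIsSubseq, List.isSublist]
    | cons x xs =>
      simp only [pvIsSubseq, List.isSublist, beq_iff_eq]
      by_cases h : x = y <;> simp [h, ih]

lemma pv_isSubseq_iff (a b : List Char) : pvIsSubseq a b = true ↔ a.Sublist b := by
  rw [pv_isSubseq_eq_isSublist]
  exact List.isSublist_iff_sublist

lemma pv_count_flatMap {α β : Type} [DecidableEq β] (f : α → List β) (l : List α) (u : β) :
    (l.flatMap f).count u = (l.map (fun x => (f x).count u)).sum := by
  induction l with
  | nil => simp
  | cons x t ih => simp [List.count_append, ih]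

lemma pv_sum_map_single {α : Type} [DecidableEq α] (l : List α) (f : α → Nat) (v : α)
    (hnd : l.Nodup) (hv : v ∈ l) (hf1 : f v = 1) (hf0 : ∀ r ∈ l, r ≠ v → f r = 0) :
    (l.map f).sum = 1 := by
  induction l with
  | nil => simp at hv
  | cons x t ih =>
    rcases List.nodup_cons.mp hnd with ⟨hxt, hndt⟩
    rcases List.mem_cons.mp hv with rfl | hvt
    · have ht : (t.map f).sum = 0 := by
        apply List.sum_eq_zero_iff_forall_eq_nat.mpr
        intro y hy
        rcases List.mem_map.mp hy with ⟨r, hr, rfl⟩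
        exact hf0 r (List.mem_cons_of_mem _ hr) (fun h => hxt (h ▸ hr))
      simp [hf1, ht]
    · have hx : f x = 0 := hf0 x (List.mem_cons_self) (fun h => hxt (h ▸ hvt))
      have := ih hndt hvt (fun r hr hne => hf0 r (List.mem_cons_of_mem _ hr) hne)
      simp [hx, this]

lemma pv_count_self_gen (s : String) (hs : s.toList ≠ []) : (pvGen s).count s = 1 := by
  unfold pvGen
  rw [pv_count_flatMap]
  apply pv_sum_map_single _ _ s.toList.length (List.nodup_range') ?_ ?_ ?_
  · exact List.mem_range'_1.mpr ⟨List.length_pos_iff.mpr hs, by omega⟩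
  · rw [PySem.List.combinations_length_self]
    simp [String.ofList_toList]
  · intro r hr hne
    apply List.count_eq_zero.mpr
    intro hmem
    rcases List.mem_map.mp hmem with ⟨c, hc, hcs⟩
    rcases (PySem.List.mem_combinations_iff _ _ _).mp hc with ⟨_, hlen⟩
    have : c = s.toList := by rw [← hcs, String.toList_ofList]
    rw [this] at hlen
    exact hne hlen.symm

-- conditional running-max fold: full ≤-characterisation
lemma pv_cfold_le {α : Type} (p : α → Bool) (g : α → Int) (L : List α) (a c : Int) :
    L.foldl (fun acc x => if p x then max acc (g x) else acc) a ≤ c ↔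
      (a ≤ c ∧ ∀ x ∈ L, p x = true → g x ≤ c) := by
  induction L generalizing a with
  | nil => simp
  | cons y t ih =>
    simp only [List.foldl_cons, List.mem_cons]
    constructor
    · intro h
      rcases (ih _).mp h with ⟨h1, h2⟩
      by_cases hp : p y = true
      · rw [if_pos hp, max_le_iff] at h1
        refine ⟨h1.1, ?_⟩
        rintro x (rfl | hx) hpx
        · exact h1.2
        · exact h2 x hx hpx
      · rw [if_neg hp] at h1
        refine ⟨h1, ?_⟩
        rintro x (rfl | hx) hpx
        · exact absurd hpx hp
        · exact h2 x hx hpx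
    · rintro ⟨h1, h2⟩
      refine (ih _).mpr ⟨?_, fun x hx hpx => h2 x (Or.inr hx) hpx⟩
      split_ifs with hp
      · exact max_le h1 (h2 y (Or.inl rfl) hp)
      · exact h1

lemma pv_base_le_cfold {α : Type} (p : α → Bool) (g : α → Int) (L : List α) (a : Int) :
    a ≤ L.foldl (fun acc x => if p x then max acc (g x) else acc) a :=
  ((pv_cfold_le p g L a _).mp le_rfl).1

lemma pv_elem_le_cfold {α : Type} (p : α → Bool) (g : α → Int) (L : List α) (a : Int)
    {x : α} (hx : x ∈ L) (hp : p x = true) :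
    g x ≤ L.foldl (fun acc x => if p x then max acc (g x) else acc) a :=
  ((pv_cfold_le p g L a _).mp le_rfl).2 x hx hp

-- membership of a string among all generated subsequence-strings
lemma pv_mem_all_iff (strs : List String) (u : String) :
    u ∈ pvAll strs ↔ ∃ s ∈ strs, u ∈ pvGen s := List.mem_flatMap

-- "s is uncommon": occurs once and is a subsequence of no other element
def pvGood (strs : List String) (s : String) : Prop :=
  strs.count s = 1 ∧ ∀ t ∈ strs, t ≠ s → ¬ s.toList.Sublist t.toList

lemma pv_sum_map_eq_count (l : List String) (s : String) :
    (l.map (fun t => if t = s then 1 else 0)).sum = l.count s := by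
  induction l with
  | nil => simp
  | cons x t ih =>
    by_cases h : x = s <;> simp [h, ih, Nat.add_comm]

lemma pv_add_le_sum_map {α : Type} (l : List α) (f : α → Nat) {x y : α} (hxy : x ≠ y) :
    x ∈ l → y ∈ l → f x + f y ≤ (l.map f).sum := by
  induction l with
  | nil => intro h; simp at h
  | cons a t ih =>
    intro hx hy
    rcases List.mem_cons.mp hx with rfl | hx'
    · have hy' : y ∈ t := by
        rcases List.mem_cons.mp hy with rfl | h
        · exact absurd rfl hxy
        · exact h
      have := List.le_sum_of_mem (List.mem_map_of_mem (f := f) hy')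
      simp only [List.map_cons, List.sum_cons]
      omega
    · rcases List.mem_cons.mp hy with rfl | hy'
      · have := List.le_sum_of_mem (List.mem_map_of_mem (f := f) hx')
        simp only [List.map_cons, List.sum_cons]
        omega
      · have := ih hx' hy'
        simp only [List.map_cons, List.sum_cons]
        omega

lemma pv_two_le_sum_map_of_count {α : Type} [DecidableEq α] (l : List α) (f : α → Nat)
    {x : α} (h2 : 2 ≤ l.count x) (hf : 1 ≤ f x) : 2 ≤ (l.map f).sum := by
  have hsub : (List.replicate 2 x).Sublist l := List.replicate_sublist_iff.mpr h2
  have := (hsub.map f).sum_le_sum (by intro b _; exact Nat.zero_le b)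
  simp only [List.map_replicate, List.sum_replicate, smul_eq_mul] at this
  omega

-- count-1 in the generated multiset ⟺ "uncommon", for a nonempty member string
lemma pv_cntAll_eq_one_iff (strs : List String) (s : String) (hs : s ∈ strs)
    (hnil : s.toList ≠ []) : (pvAll strs).count s = 1 ↔ pvGood strs s := by
  rw [show (pvAll strs).count s = (strs.map (fun t => (pvGen t).count s)).sum from
    pv_count_flatMap _ _ _]
  constructor
  · intro h1
    by_contra hng
    have hge1 : 1 ≤ (pvGen s).count s := by rw [pv_count_self_gen s hnil]
    rcases not_and_or.mp hng with hc | ht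
    · have hc2 : 2 ≤ strs.count s := by
        have := List.count_pos_iff.mpr hs
        omega
      have := pv_two_le_sum_map_of_count strs (fun t => (pvGen t).count s) hc2 hge1
      omega
    · push Not at ht
      rcases ht with ⟨t, htm, htne, hsub⟩
      have htg : 1 ≤ (pvGen t).count s :=
        List.count_pos_iff.mpr ((pv_mem_gen s t).mpr ⟨hsub, hnil⟩)
      have := pv_add_le_sum_map strs (fun t => (pvGen t).count s)
        (fun h => htne h.symm) hs htm
      simp only at this
      omega
  · rintro ⟨hc1, hno⟩
    have : ∀ t ∈ strs, (pvGen t).count s = (fun t => if t = s then 1 else 0) t := by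
      intro t htm
      by_cases h : t = s
      · subst h; simp [pv_count_self_gen t hnil]
      · simp only [h, if_false]
        apply List.count_eq_zero.mpr
        intro hmem
        exact hno t htm h ((pv_mem_gen s t).mp hmem).1
    rw [List.map_congr_left this, pv_sum_map_eq_count, hc1]

-- every count-1 key is dominated in length by an uncommon member string
lemma pv_key_dominated (strs : List String) (u : String) (hu : u ∈ pvAll strs)
    (hc : (pvAll strs).count u = 1) :
    ∃ s ∈ strs, pvGood strs s ∧ s.toList ≠ [] ∧ u.toList.length ≤ s.toList.length := by
  rcases (pv_mem_all_iff strs u).mp hu with ⟨s, hs, hgen⟩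
  rcases (pv_mem_gen u s).mp hgen with ⟨hsub, hnilu⟩
  have hnils : s.toList ≠ [] := by
    intro h
    rw [h] at hsub
    exact hnilu (List.sublist_nil.mp hsub)
  have hcsum : (pvAll strs).count u = (strs.map (fun t => (pvGen t).count u)).sum :=
    pv_count_flatMap _ _ _
  have hcs : 1 ≤ (pvGen s).count u := List.count_pos_iff.mpr hgen
  refine ⟨s, hs, ⟨?_, ?_⟩, hnils, hsub.length_le⟩
  · by_contra hc2'
    have hc2 : 2 ≤ strs.count s := by
      have := List.count_pos_iff.mpr hs
      omega
    have := pv_two_le_sum_map_of_count strs (fun t => (pvGen t).count u) hc2 hcs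
    omega
  · intro t htm htne hsubst
    have htg : 1 ≤ (pvGen t).count u :=
      List.count_pos_iff.mpr ((pv_mem_gen u t).mpr ⟨hsub.trans hsubst, hnilu⟩)
    have := pv_add_le_sum_map strs (fun t => (pvGen t).count u)
      (fun h => htne h.symm) hs htm
    simp only at this
    omega

-- an uncommon empty string forces strs = [""]
lemma pv_good_empty (strs : List String) (s : String) (hs : s ∈ strs)
    (hnil : s.toList = []) (hg : pvGood strs s) : strs = [""] := by
  have hse : s = "" := String.toList_inj.mp (by simp [hnil])
  subst hse
  have hall : ∀ t ∈ strs, t = "" := by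
    intro t htm
    by_contra hne
    exact hg.2 t htm hne (by simp [hnil])
  have hcount : strs.count "" = strs.length := List.count_eq_length.mpr (by
    intro t htm
    exact ((hall t htm) ▸ rfl))
  have hlen : strs.length = 1 := by
    have := hg.1
    omega
  rcases List.length_eq_one_iff.mp hlen with ⟨a, rfl⟩
  rw [hall a (by simp)]

-- tolerate only strictly longer containers: equal-length containment is equality
lemma pv_good_iff_len (strs : List String) (s : String) :
    pvGood strs s ↔ strs.count s = 1 ∧
      ∀ t ∈ strs, s.toList.length < t.toList.length → ¬ s.toList.Sublist t.toList := by
  constructor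
  · rintro ⟨h1, h2⟩
    refine ⟨h1, fun t htm hlt hsub => ?_⟩
    refine h2 t htm ?_ hsub
    intro h
    rw [h] at hlt
    omega
  · rintro ⟨h1, h2⟩
    refine ⟨h1, fun t htm htne hsub => ?_⟩
    rcases Nat.lt_or_ge s.toList.length t.toList.length with hlt | hge
    · exact h2 t htm hlt hsub
    · have hlen : s.toList.length = t.toList.length :=
        Nat.le_antisymm hsub.length_le hge
      exact htne (String.toList_inj.mp (hsub.eq_of_length hlen)).symm

-- takeWhile on a length-sorted-descending list keeps exactly the strictly longer ones
lemma pv_mem_takeWhile (l : List String) (c : Nat)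
    (hp : l.Pairwise (fun a b => b.toList.length ≤ a.toList.length)) (t : String) :
    t ∈ l.takeWhile (fun t' => decide (c < t'.toList.length)) ↔
      t ∈ l ∧ c < t.toList.length := by
  induction l with
  | nil => simp
  | cons a r ih =>
    rcases List.pairwise_cons.mp hp with ⟨ha, hr⟩
    by_cases h : c < a.toList.length
    · rw [List.takeWhile_cons_of_pos (by simpa using h)]
      simp only [List.mem_cons, ih hr]
      constructor
      · rintro (rfl | ⟨hm, hc⟩)
        · exact ⟨Or.inl rfl, h⟩
        · exact ⟨Or.inr hm, hc⟩
      · rintro ⟨rfl | hm, hc⟩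
        · exact Or.inl rfl
        · exact Or.inr ⟨hm, hc⟩
    · rw [List.takeWhile_cons_of_neg (by simpa using h)]
      simp only [List.not_mem_nil, false_iff, not_and, List.mem_cons]
      rintro (rfl | hm)
      · omega
      · have := ha t hm
        omega

-- the early-exit loop: either nothing fires and it returns -1, or it returns the
-- length of the first element whose condition fires
lemma pv_scan_cases (cnt : PySem.Dict String Int) (distinct : List String) (l : List String) :
    (pvScan cnt distinct l = -1 ∧ ∀ s ∈ l,
      (cnt.getD s 0 == 1
        && !((distinct.takeWhile (fun t => decide (s.toList.length < t.toList.length))).any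
              (fun t => pvIsSubseq s.toList t.toList))) = false)
    ∨ ∃ l1 s l2, l = l1 ++ s :: l2 ∧
      (cnt.getD s 0 == 1
        && !((distinct.takeWhile (fun t => decide (s.toList.length < t.toList.length))).any
              (fun t => pvIsSubseq s.toList t.toList))) = true ∧
      (∀ x ∈ l1,
        (cnt.getD x 0 == 1
          && !((distinct.takeWhile (fun t => decide (x.toList.length < t.toList.length))).any
                (fun t => pvIsSubseq x.toList t.toList))) = false) ∧
      pvScan cnt distinct l = (s.toList.length : Int) := by
  induction l with
  | nil => left; exact ⟨rfl, by simp⟩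
  | cons a r ih =>
    by_cases h : (cnt.getD a 0 == 1
        && !((distinct.takeWhile (fun t => decide (a.toList.length < t.toList.length))).any
              (fun t => pvIsSubseq a.toList t.toList))) = true
    · right
      refine ⟨[], a, r, rfl, h, by simp, ?_⟩
      simp only [pvScan]
      rw [if_pos h]
    · have hsc : pvScan cnt distinct (a :: r) = pvScan cnt distinct r := by
        simp only [pvScan]
        rw [if_neg (by simpa using h)]
      rcases ih with ⟨hv, hall⟩ | ⟨l1, s, l2, rfl, hQ, hl1, hv⟩
      · left
        refine ⟨hsc.trans hv, ?_⟩
        intro s hsm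
        rcases List.mem_cons.mp hsm with rfl | hm
        · simpa using h
        · exact hall s hm
      · right
        refine ⟨a :: l1, s, l2, rfl, hQ, ?_, hsc.trans hv⟩
        intro x hx
        rcases List.mem_cons.mp hx with rfl | hm
        · simpa using h
        · exact hl1 x hm

-- ===== VERDICT (by name: the statement is the Claim_ definition above) =====
theorem findLUSlength_spec : Claim_equal_findLUSlength := by
  unfold Claim_equal_findLUSlength
  intro strs _hdom hpre
  simp only [Spec_findLUSlength, findLUSlength, findLUSlength_alt, pv_build_eq,
    PySem.Dict.foldl_insert_getD_add_one_eq_counter, PySem.Dict.keys_counter]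
  set DD := PySem.List.sorted (PySem.Set.ofList strs) (fun s => s.toList.length) true with hDD
  have hmemDD : ∀ s : String, s ∈ DD ↔ s ∈ strs := by
    intro s
    rw [hDD, PySem.List.mem_sorted, PySem.Set.mem_ofList]
  have hpw : DD.Pairwise (fun a b => b.toList.length ≤ a.toList.length) :=
    PySem.List.sorted_pairwise_rev _ _
  have hgetD : ∀ u : String,
      ((((pvAll strs).foldl (fun d u => d.insert u (d.getD u 0 + 1))
          (∅ : Std.HashMap String Int)).getD u 0 == 1) = true) ↔ (pvAll strs).count u = 1 := by
    intro u
    rw [beq_iff_eq, pv_getD_foldl, Std.HashMap.getD_empty]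
    omega
  have hkeys : ∀ u : String,
      u ∈ ((pvAll strs).foldl (fun d u => d.insert u (d.getD u 0 + 1))
        (∅ : Std.HashMap String Int)).keys ↔ u ∈ pvAll strs := by
    intro u
    rw [pv_mem_keys_foldl, Std.HashMap.mem_keys]
    simp [Std.HashMap.not_mem_empty]
  -- the loop condition, read as "uncommon"
  have hQ : ∀ s ∈ DD,
      ((PySem.Dict.counter strs).getD s 0 == 1
        && !((DD.takeWhile (fun t => decide (s.toList.length < t.toList.length))).any
              (fun t => pvIsSubseq s.toList t.toList))) = true ↔ pvGood strs s := by
    intro s hsDD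
    rw [Bool.and_eq_true, beq_iff_eq, PySem.Dict.getD_counter,
      Bool.not_eq_eq_eq_not, Bool.not_true, ← Bool.not_eq_true, List.any_eq_true,
      pv_good_iff_len]
    constructor
    · rintro ⟨h1, h2⟩
      refine ⟨by exact_mod_cast h1, ?_⟩
      intro t htm hlt hsub
      exact h2 ⟨t, (pv_mem_takeWhile DD _ hpw t).mpr ⟨(hmemDD t).mpr htm, hlt⟩,
        (pv_isSubseq_iff _ _).mpr hsub⟩
    · rintro ⟨h1, h2⟩
      refine ⟨by exact_mod_cast h1, ?_⟩
      rintro ⟨t, htw, hsb⟩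
      rcases (pv_mem_takeWhile DD _ hpw t).mp htw with ⟨htDD, hlt⟩
      exact h2 t ((hmemDD t).mp htDD) hlt ((pv_isSubseq_iff _ _).mp hsb)
  set pA : String → Bool := fun u =>
    (((pvAll strs).foldl (fun d u => d.insert u (d.getD u 0 + 1))
      (∅ : Std.HashMap String Int)).getD u 0 == 1) with hpA
  set gA : String → Int := fun u => ((u.toList.length : Int)) with hgA
  rcases pv_scan_cases (PySem.Dict.counter strs) DD DD with ⟨hval, hnone⟩ |
    ⟨l1, s, l2, hsplit, hQs, hl1, hval⟩
  · rw [hval]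
    apply le_antisymm
    · apply (pv_cfold_le pA gA _ (-1) _).mpr
      refine ⟨le_rfl, ?_⟩
      intro u hu hp
      exfalso
      rcases pv_key_dominated strs u ((hkeys u).mp hu) ((hgetD u).mp hp) with
        ⟨t, htm, hgood, _, _⟩
      have htDD : t ∈ DD := (hmemDD t).mpr htm
      have := (hQ t htDD).mpr hgood
      rw [hnone t htDD] at this
      exact Bool.false_ne_true this
    · exact pv_base_le_cfold _ _ _ _
  · rw [hval]
    have hsDD : s ∈ DD := by
      rw [hsplit]
      exact List.mem_append_right _ (List.mem_cons_self)
    have hgood : pvGood strs s := (hQ s hsDD).mp hQs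
    have hsm : s ∈ strs := (hmemDD s).mp hsDD
    have hnil : s.toList ≠ [] := by
      intro h
      exact hpre (pv_good_empty strs s hsm h hgood)
    have hsAll : s ∈ pvAll strs :=
      (pv_mem_all_iff strs s).mpr ⟨s, hsm, (pv_mem_gen s s).mpr ⟨List.Sublist.refl _, hnil⟩⟩
    have hsCnt : (pvAll strs).count s = 1 := (pv_cntAll_eq_one_iff strs s hsm hnil).mpr hgood
    apply le_antisymm
    · apply (pv_cfold_le pA gA _ (-1) _).mpr
      constructor
      · have : (0 : Int) ≤ (s.toList.length : Int) := Int.natCast_nonneg _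
        omega
      · intro u hu hp
        rcases pv_key_dominated strs u ((hkeys u).mp hu) ((hgetD u).mp hp) with
          ⟨t, htm, hgoodt, _, hle⟩
        have htDD : t ∈ DD := (hmemDD t).mpr htm
        have hQt := (hQ t htDD).mpr hgoodt
        have hts : t.toList.length ≤ s.toList.length := by
          rw [hsplit] at htDD hpw
          rcases List.mem_append.mp htDD with hm1 | hm2
          · exfalso
            rw [hl1 t hm1] at hQt
            exact Bool.false_ne_true hQt
          · rcases List.mem_cons.mp hm2 with rfl | hm2'
            · exact le_rfl
            · rcases List.pairwise_append.mp hpw with ⟨_, hp2, _⟩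
              exact (List.pairwise_cons.mp hp2).1 t hm2'
        have : u.toList.length ≤ s.toList.length := le_trans hle hts
        simp only [hgA]
        exact_mod_cast this
    · exact pv_elem_le_cfold pA gA _ (-1) ((hkeys s).mpr hsAll) ((hgetD s).mpr hsCnt)
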